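-- pv_equiv track=rewrite | github.com/hyeongseokgo/Algorithm | 프로그래머스/2/42578. 의상/의상.py | solution
-- ===== SOURCE A (Python) =====
-- def solution(clothes):
--
--     clo_type =[]
--     clo_num = []
--
--
--     for i in clothes:
--         if i[1] in clo_type:
--             clo_num[clo_type.index(i[1])] += 1
--         else:
--             clo_type.append(i[1])
--             clo_num.append(1)
--
--     answer = 1
--     for i in clo_num:
--         answer *= (i+1)
--     return answer-1
-- ===== SOURCE B (Python) =====
-- def solution(clothes):
--     # Sort the types, then scan the sorted list once, closing each run of
--     # equal types by multiplying (run length + 1) into the running product.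
--     ts = sorted(c[1] for c in clothes)
--     answer = 1
--     run = 0
--     prev = None
--     for t in ts:
--         if prev == t:
--             run += 1
--         else:
--             answer *= run + 1
--             run = 1
--             prev = t
--     return answer * (run + 1) - 1
-- ===== Notes on version B (the rewrite author's own statement) =====
-- stated objective: alternative
-- what changed: Replaces A's parallel-list tally (membership test plus list.index to bump a counter list, then a product loop) by sorting the types and doing one run-length scan over the sorted list, multiplying (run+1) into the product as each run of equal types closes.
-- outside the precondition, e.g. on solution([['a']]): A raises IndexError, B raises IndexError
import Mathlib
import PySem

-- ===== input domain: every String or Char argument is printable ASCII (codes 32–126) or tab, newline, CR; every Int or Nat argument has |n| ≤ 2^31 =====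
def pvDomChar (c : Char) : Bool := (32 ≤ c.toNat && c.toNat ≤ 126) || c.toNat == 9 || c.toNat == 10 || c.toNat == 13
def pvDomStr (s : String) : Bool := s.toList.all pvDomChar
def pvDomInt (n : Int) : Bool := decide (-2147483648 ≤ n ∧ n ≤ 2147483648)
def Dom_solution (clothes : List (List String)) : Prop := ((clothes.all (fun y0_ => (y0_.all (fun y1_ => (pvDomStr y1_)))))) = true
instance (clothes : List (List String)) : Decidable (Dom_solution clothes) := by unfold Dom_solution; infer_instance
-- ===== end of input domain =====

-- B replaces A's parallel-list tally (membership + list.index counter bump, then a product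
-- loop) by sorting the types and doing one run-length scan over the sorted list; objective:
-- alternative (no speed claim).

-- i[1] (IndexError on a short item) — both ports read it totally with a "" default,
-- used only outside Pre_.
def pvTy (c : List String) : String := (PySem.List.pyGet? c 1).getD ""

-- ===== PORT A =====
def solution (clothes : List (List String)) : Int :=
  -- clo_type / clo_num tally loop
  let st := clothes.foldl (fun (st : List String × List Int) i =>
    let t := pvTy i
    if t ∈ st.1 then
      (st.1, st.2.set ((PySem.List.index? st.1 t).getD 0)
                      (st.2.getD ((PySem.List.index? st.1 t).getD 0) 0 + 1))
    else (st.1 ++ [t], st.2 ++ [1])) ([], [])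
  -- answer *= (i+1) loop
  let answer := st.2.foldl (fun a i => a * (i + 1)) 1
  answer - 1

-- ===== PORT B =====
def solution_alt (clothes : List (List String)) : Int :=
  -- ts = sorted(c[1] for c in clothes)
  let ts := PySem.List.sorted (clothes.map (fun c => pvTy c)) (fun x => x) false
  -- run-length scan: state (answer, run, prev)
  let st := ts.foldl (fun (st : Int × Int × Option String) t =>
    if st.2.2 == some t then (st.1, st.2.1 + 1, st.2.2)
    else (st.1 * (st.2.1 + 1), 1, some t)) (1, 0, none)
  st.1 * (st.2.1 + 1) - 1

-- ===== PRECONDITION & SPEC =====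
-- Pre_ excludes exactly the inputs where Python A raises IndexError on i[1]
-- (an item with fewer than two entries); B raises there too.
def Pre_solution (clothes : List (List String)) : Prop :=
  ∀ c ∈ clothes, 2 ≤ c.length
instance (clothes : List (List String)) : Decidable (Pre_solution clothes) := by
  unfold Pre_solution; infer_instance

def pvWitness_solution : List (List String) :=
  [["yellow_hat", "headgear"], ["blue_sunglasses", "eyewear"], ["green_turban", "headgear"]]

def Spec_solution (clothes : List (List String)) (out : Int) : Prop := out = solution_alt clothes
instance (clothes : List (List String)) (out : Int) : Decidable (Spec_solution clothes out) := by unfold Spec_solution; infer_instance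

-- ===== CLAIM (what is proved, stated in full; the proofs are below) =====
def Claim_equal_solution : Prop := ∀ (clothes : List (List String)), Dom_solution clothes → Pre_solution clothes → Spec_solution clothes (solution clothes)

-- ===== LEMMAS AND PROOFS =====

-- product over the distinct elements of l of (count + 1), by peeling the head's occurrences
def pvQ : List String → Int
  | [] => 1
  | t :: rest => (((t :: rest).count t : Int) + 1) * pvQ (rest.filter (· ≠ t))
termination_by l => l.length
decreasing_by
  simp only [List.length_unattach, List.length_cons]
  exact Nat.lt_succ_of_le ((List.length_filter_le _ _).trans (by simp))

theorem pvQ_eq (l : List String) :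
    pvQ l = ∏ t ∈ l.toFinset, ((l.count t : Int) + 1) := by
  generalize hn : l.length = n
  induction n using Nat.strong_induction_on generalizing l with
  | _ n ih =>
    cases l with
    | nil => rw [pvQ]; simp
    | cons t rest =>
      have hlen : (rest.filter (· ≠ t)).length < n := by
        subst hn
        simp only [List.length_cons]
        exact Nat.lt_succ_of_le (List.length_filter_le _ _)
      have ihm := ih _ hlen (rest.filter (· ≠ t)) rfl
      have htf : (rest.filter (· ≠ t)).toFinset = (t :: rest).toFinset.erase t := by
        ext s
        simp only [List.mem_toFinset, List.mem_filter, Finset.mem_erase, List.mem_cons,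
          decide_eq_true_eq]
        constructor
        · rintro ⟨hs, hne⟩; exact ⟨hne, Or.inr hs⟩
        · rintro ⟨hne, hs | hs⟩; exact absurd hs hne; exact ⟨hs, hne⟩
      have hcnt : ∀ s ∈ (rest.filter (· ≠ t)).toFinset,
          ((rest.filter (· ≠ t)).count s : Int) + 1 = (((t :: rest).count s : Int)) + 1 := by
        intro s hs
        simp only [List.mem_toFinset, List.mem_filter, decide_eq_true_eq] at hs
        have hd : (decide (s ≠ t)) = true := decide_eq_true hs.2
        rw [List.count_filter]
        simp [List.count_cons]
        exacts [fun h => hs.2 h.symm, hd]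
      have hmem : t ∈ (t :: rest).toFinset := by simp
      rw [pvQ, ihm, Finset.prod_congr rfl hcnt, htf]
      exact Finset.mul_prod_erase _ (fun s => ((List.count s (t :: rest) : Int) + 1)) hmem

-- first-occurrence dedup of `r` relative to already-seen `s`
def pvD (s : List String) : List String → List String
  | [] => []
  | x :: xs => if x ∈ s then pvD s xs else x :: pvD (s ++ [x]) xs

theorem pvD_mem (r : List String) : ∀ (s : List String) (t : String),
    t ∈ pvD s r ↔ t ∉ s ∧ t ∈ r := by
  induction r with
  | nil => intro s t; simp [pvD]
  | cons x xs ih =>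
    intro s t
    by_cases hx : x ∈ s
    · rw [pvD, if_pos hx, ih]
      constructor
      · rintro ⟨h1, h2⟩; exact ⟨h1, List.mem_cons_of_mem _ h2⟩
      · rintro ⟨h1, h2⟩
        rcases List.mem_cons.1 h2 with rfl | h2
        · exact absurd hx h1
        · exact ⟨h1, h2⟩
    · rw [pvD, if_neg hx]
      constructor
      · intro h
        rcases List.mem_cons.1 h with rfl | h
        · exact ⟨hx, List.mem_cons_self⟩
        · obtain ⟨h1, h2⟩ := (ih _ t).1 h
          refine ⟨fun hs => h1 ?_, List.mem_cons_of_mem _ h2⟩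
          simp [hs]
      · rintro ⟨h1, h2⟩
        rcases List.mem_cons.1 h2 with rfl | h2
        · exact List.mem_cons_self
        · by_cases he : t = x
          · exact he ▸ List.mem_cons_self
          · refine List.mem_cons_of_mem _ ((ih _ t).2 ⟨?_, h2⟩)
            intro hmem
            rcases List.mem_append.1 hmem with h | h
            · exact h1 h
            · exact he (List.mem_singleton.1 h)

theorem pvD_nodup (r : List String) : ∀ (s : List String),
    s.Nodup → (s ++ pvD s r).Nodup := by
  induction r with
  | nil => intro s hs; simpa [pvD] using hs
  | cons x xs ih =>
    intro s hs
    by_cases hx : x ∈ s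
    · rw [pvD, if_pos hx]; exact ih s hs
    · rw [pvD, if_neg hx, show s ++ x :: pvD (s ++ [x]) xs = (s ++ [x]) ++ pvD (s ++ [x]) xs
        by simp]
      refine ih (s ++ [x]) ?_
      simp only [List.nodup_append, List.nodup_singleton]
      exact ⟨hs, trivial, fun a ha b hb => by
        rw [List.mem_singleton] at hb; subst hb; exact fun he => hx (he ▸ ha)⟩

theorem pvA_inv (r : List String) : ∀ (p ct : List String),
    ct.Nodup → (∀ t, t ∈ p ↔ t ∈ ct) →
    r.foldl (fun (st : List String × List Int) t =>
      if t ∈ st.1 then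
        (st.1, st.2.set ((PySem.List.index? st.1 t).getD 0)
                        (st.2.getD ((PySem.List.index? st.1 t).getD 0) 0 + 1))
      else (st.1 ++ [t], st.2 ++ [1]))
      (ct, ct.map (fun t => ((p.count t : Nat) : Int)))
    = (ct ++ pvD ct r, (ct ++ pvD ct r).map (fun t => (((p ++ r).count t : Nat) : Int))) := by
  induction r with
  | nil => intro p ct _ _; simp [pvD]
  | cons x xs ih =>
    intro p ct hnd hmem
    by_cases hx : x ∈ ct
    · -- existing type: bump counter at its index
      obtain ⟨k, hk⟩ : ∃ k, PySem.List.index? ct x = some k := by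
        have := (PySem.List.index?_isSome_iff (xs := ct) (v := x)).2 hx
        exact Option.isSome_iff_exists.1 this
      obtain ⟨hklt, hctk, -⟩ := PySem.List.getElem_of_index?_eq_some hk
      have hset : (ct.map (fun t => ((p.count t : Nat) : Int))).set k
            ((ct.map (fun t => ((p.count t : Nat) : Int))).getD k 0 + 1)
          = ct.map (fun t => (((p ++ [x]).count t : Nat) : Int)) := by
        have hgetD : (ct.map (fun t => ((p.count t : Nat) : Int))).getD k 0
            = ((p.count x : Nat) : Int) := by
          rw [List.getD_eq_getElem?_getD]
          simp [hklt, hctk]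
        rw [hgetD]
        apply List.ext_getElem
        · simp
        · intro j h1 h2
          have hj : j < ct.length := by simpa using h2
          rw [List.getElem_set]
          simp only [List.getElem_map]
          by_cases hjk : k = j
          · subst hjk
            rw [if_pos rfl, hctk]
            simp [List.count_append]
          · rw [if_neg hjk]
            have hne : ct[j]'hj ≠ x := by
              intro he
              apply hjk
              have : ct[k]'hklt = ct[j]'hj := by rw [hctk, he]
              exact (List.Nodup.getElem_inj_iff hnd).1 this
            have hne' : ¬ (x = ct[j]'hj) := fun h => hne h.symm
            simp [List.count_append, hne']
      simp only [List.foldl_cons, if_pos hx, hk, Option.getD_some, hset]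
      rw [ih (p ++ [x]) ct hnd (by
        intro t; simp only [List.mem_append, List.mem_singleton]
        constructor
        · rintro (h | rfl); exact (hmem t).1 h; exact hx
        · intro h; exact Or.inl ((hmem t).2 h))]
      simp only [pvD, if_pos hx, List.append_assoc, List.singleton_append]
    · -- new type: append to both lists
      have hcnt0 : p.count x = 0 :=
        List.count_eq_zero.2 (fun h => hx ((hmem x).1 h))
      have happ : ct.map (fun t => ((p.count t : Nat) : Int)) ++ [1]
          = (ct ++ [x]).map (fun t => (((p ++ [x]).count t : Nat) : Int)) := by
        rw [List.map_append]
        congr 1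
        · apply List.map_congr_left
          intro t ht
          have h2 : ¬ (x = t) := fun he => hx (he ▸ ht)
          simp [List.count_append, h2]
        · simp [List.count_append, List.count_cons, hcnt0]
      have hnd' : (ct ++ [x]).Nodup := by
        simp only [List.nodup_append, List.nodup_singleton]
        refine ⟨hnd, True.intro, ?_⟩
        intro a ha b hb he
        rw [List.mem_singleton] at hb
        exact hx ((he.trans hb) ▸ ha)
      have hmem' : ∀ t, t ∈ p ++ [x] ↔ t ∈ ct ++ [x] := by
        intro t; simp [hmem t]
      simp only [List.foldl_cons, if_neg hx, happ]
      rw [ih (p ++ [x]) (ct ++ [x]) hnd' hmem']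
      simp only [pvD, if_neg hx, List.append_assoc, List.cons_append, List.nil_append]

theorem pvProdFold (l : List Int) : ∀ (a : Int),
    l.foldl (fun a i => a * (i + 1)) a = a * (l.map (· + 1)).prod := by
  induction l with
  | nil => intro a; simp
  | cons x xs ih => intro a; simp [List.foldl_cons, ih, mul_assoc]

-- B's run-length scan, once a run of x is open and all of l is ≥ x
theorem pvB_run (l : List String) : ∀ (x : String) (a r : Int),
    l.Pairwise (· ≤ ·) → (∀ y ∈ l, x ≤ y) →
    (l.foldl (fun (st : Int × Int × Option String) t =>
        if st.2.2 == some t then (st.1, st.2.1 + 1, st.2.2)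
        else (st.1 * (st.2.1 + 1), 1, some t)) (a, r, some x)).1
      * ((l.foldl (fun (st : Int × Int × Option String) t =>
        if st.2.2 == some t then (st.1, st.2.1 + 1, st.2.2)
        else (st.1 * (st.2.1 + 1), 1, some t)) (a, r, some x)).2.1 + 1)
    = a * (r + (l.count x : Int) + 1) * pvQ (l.filter (· ≠ x)) := by
  induction l with
  | nil => intro x a r _ _; rw [List.filter_nil, pvQ]; simp
  | cons t rest ih =>
    intro x a r hpw hge
    have hpw' := (List.pairwise_cons.1 hpw).2
    have hhead := (List.pairwise_cons.1 hpw).1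
    by_cases he : x = t
    · subst he
      have hb : ((some x : Option String) == some x) = true := by simp
      rw [List.foldl_cons, if_pos hb]
      rw [ih x a (r + 1) hpw' hhead]
      have hfe : (rest.filter (· ≠ x)) = ((x :: rest).filter (· ≠ x)) := by simp
      rw [hfe, List.count_cons_self]
      push_cast; ring_nf
    · have hb : ¬ (((some x : Option String) == some t) = true) := by
        simp [he]
      rw [List.foldl_cons, if_neg hb]
      rw [ih t (a * (r + 1)) 1 hpw' hhead]
      have hlt : x < t := lt_of_le_of_ne (hge t List.mem_cons_self) he
      have hxrest : x ∉ rest := fun h => absurd (hhead x h) (not_le.2 hlt)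
      have hcnt : ((t :: rest).count x : Int) = 0 := by
        simp [Ne.symm he, List.count_eq_zero.2 hxrest]
      have hfil : (t :: rest).filter (· ≠ x) = t :: rest := by
        apply List.filter_eq_self.2
        intro y hy
        rcases List.mem_cons.1 hy with rfl | hy
        · simp [Ne.symm he]
        · have : x < y := lt_of_lt_of_le hlt (hhead y hy)
          simp [(ne_of_lt this).symm]
      rw [hcnt, hfil, pvQ]
      have hct : ((t :: rest).count t : Int) = (rest.count t : Int) + 1 := by
        simp [List.count_cons_self]
      rw [hct]
      ring_nf

-- a nodup enumeration of the distinct elements turns the mapped product into a Finset product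
theorem pvProd_nodup (d l : List String) (hnd : d.Nodup)
    (hmem : ∀ t, t ∈ d ↔ t ∈ l) :
    (d.map (fun t => ((l.count t : Nat) : Int) + 1)).prod
      = ∏ t ∈ l.toFinset, ((l.count t : Int) + 1) := by
  have htf : d.toFinset = l.toFinset := by
    ext t; simp [List.mem_toFinset, hmem t]
  rw [← htf, ← List.prod_toFinset _ hnd]

-- ===== VERDICT (by name: the statement is the Claim_ definition above) =====
theorem solution_spec : Claim_equal_solution := by
  intro clothes _ _
  show solution clothes = solution_alt clothes
  unfold solution solution_alt
  have hA := pvA_inv (clothes.map (fun c => pvTy c)) [] [] List.nodup_nil (by simp)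
  rw [List.foldl_map] at hA
  simp only [List.map_nil, List.nil_append] at hA
  have hperm : (PySem.List.sorted (clothes.map (fun c => pvTy c)) (fun x => x) false).Perm
      (clothes.map (fun c => pvTy c)) := PySem.List.sorted_perm _ _ _
  have hpw : (PySem.List.sorted (clothes.map (fun c => pvTy c)) (fun x => x) false).Pairwise
      (· ≤ ·) := by
    simpa using PySem.List.sorted_pairwise (xs := clothes.map (fun c => pvTy c))
      (key := fun x => x)
  have hBval : ((PySem.List.sorted (clothes.map (fun c => pvTy c)) (fun x => x) false).foldl
        (fun (st : Int × Int × Option String) t =>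
          if st.2.2 == some t then (st.1, st.2.1 + 1, st.2.2)
          else (st.1 * (st.2.1 + 1), 1, some t)) (1, 0, none)).1
      * (((PySem.List.sorted (clothes.map (fun c => pvTy c)) (fun x => x) false).foldl
        (fun (st : Int × Int × Option String) t =>
          if st.2.2 == some t then (st.1, st.2.1 + 1, st.2.2)
          else (st.1 * (st.2.1 + 1), 1, some t)) (1, 0, none)).2.1 + 1)
      = pvQ (PySem.List.sorted (clothes.map (fun c => pvTy c)) (fun x => x) false) := by
    cases hsseq : PySem.List.sorted (clothes.map (fun c => pvTy c)) (fun x => x) false with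
    | nil => rw [pvQ]; simp
    | cons t rest =>
      have hpw' : (t :: rest).Pairwise (· ≤ ·) := hsseq ▸ hpw
      have hb : ¬ (((none : Option String) == some t) = true) := by simp
      rw [List.foldl_cons, if_neg hb]
      norm_num only
      rw [pvB_run rest t 1 1 (List.pairwise_cons.1 hpw').2 (List.pairwise_cons.1 hpw').1, pvQ]
      have hct : ((t :: rest).count t : Int) = (rest.count t : Int) + 1 := by
        simp [List.count_cons_self]
      rw [hct]
      ring_nf
  simp only [hA, pvProdFold, List.map_map, one_mul, hBval]
  congr 1
  have hAval : ((pvD [] (clothes.map (fun c => pvTy c))).map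
        ((fun i => i + 1) ∘ fun t => (((clothes.map (fun c => pvTy c)).count t : Nat) : Int))).prod
      = ∏ t ∈ (clothes.map (fun c => pvTy c)).toFinset,
          (((clothes.map (fun c => pvTy c)).count t : Int) + 1) := by
    have := pvProd_nodup (pvD [] (clothes.map (fun c => pvTy c))) (clothes.map (fun c => pvTy c))
      (by simpa using pvD_nodup (clothes.map (fun c => pvTy c)) [] List.nodup_nil)
      (fun t => by simpa using pvD_mem (clothes.map (fun c => pvTy c)) [] t)
    simpa [Function.comp] using this
  rw [hAval, pvQ_eq, List.toFinset_eq_of_perm _ _ hperm]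
  apply Finset.prod_congr rfl
  intro t _
  rw [hperm.count_eq]
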